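-- pv_equiv track=rewrite | github.com/b-y-f/CS-61A | discs/disc01.py | get_k_run_starter
-- ===== SOURCE A (Python) =====
-- def get_k_run_starter(n, k):
--     """
--     >>> get_k_run_starter(123444345, 0) # example from description
--     3
--     >>> get_k_run_starter(123444345, 1)
--     4
--     >>> get_k_run_starter(123444345, 2)
--     4
--     >>> get_k_run_starter(123444345, 3)
--     1
--     >>> get_k_run_starter(123412341234, 1)
--     1
--     >>> get_k_run_starter(1234234534564567, 0)
--     4
--     >>> get_k_run_starter(1234234534564567, 1)
--     3
--     >>> get_k_run_starter(1234234534564567, 2)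
--     2
--     """
--     i = 0
--     final = None
--     while i <= k:
--         while n%10 == n//10%10+1 and n>10:
--             n //= 10
--         final = n%10
--         i = i+1
--         n = n//10
--     return final
-- ===== SOURCE B (Python) =====
-- def get_k_run_starter(n, k):
--     """Starting digit of the k-th ascending run of n's decimal digits,
--     counting runs from the least-significant end.  Digit positions above
--     the most significant digit read as 0, so any run past the leftmost
--     one is a run of leading zeros and starts at 0."""
--     digits = [int(c) for c in str(n)]
--     starters = [d for prev, d in zip([None] + digits, digits)
--                 if prev is None or d != prev + 1]
--     runs = starters[::-1]  # rightmost run first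
--     return runs[k] if k < len(runs) else 0
-- ===== Notes on version B (the rewrite author's own statement) =====
-- stated objective: faster
-- what changed: B converts n to its decimal string once and builds the run-starter list in a single zip-with-previous comprehension, then indexes it from the right (positions past the leftmost digit read as leading zeros, whose runs start at 0), instead of A's divmod loop that iterates k+1 times even past the digits; Pre_ excludes k < 0, where A returns None (not an int), and n < 0, where A's floor-division arithmetic returns digits of a 9-padded expansion while B's str(n) parse hits the '-' sign and raises.
-- outside the precondition, e.g. on get_k_run_starter(-5, 0): A returns 5, B raises ValueError; on get_k_run_starter(5, -1): A returns None, B returns 5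
import Mathlib
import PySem

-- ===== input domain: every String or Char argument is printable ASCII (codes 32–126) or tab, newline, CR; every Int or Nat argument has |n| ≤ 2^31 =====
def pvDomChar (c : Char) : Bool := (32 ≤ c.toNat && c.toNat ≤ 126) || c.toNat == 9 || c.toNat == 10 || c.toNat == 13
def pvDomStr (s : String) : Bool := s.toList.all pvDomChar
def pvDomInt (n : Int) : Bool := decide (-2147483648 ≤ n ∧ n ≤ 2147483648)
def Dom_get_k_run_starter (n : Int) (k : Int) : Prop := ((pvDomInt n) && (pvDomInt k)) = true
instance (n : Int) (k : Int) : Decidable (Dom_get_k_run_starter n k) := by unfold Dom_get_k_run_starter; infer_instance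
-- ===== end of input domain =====

-- B builds the run-starter list from str(n) in one zip-with-previous comprehension and
-- indexes it from the right (positions past the leftmost digit read as leading zeros),
-- instead of A's nested divmod loops; equivalence is claimed on n ≥ 0, k ≥ 0.

-- ===== PORT A =====
-- inner loop `while n%10 == n//10%10+1 and n>10: n //= 10`
def stripRun (n : Int) : Int :=
  if h : PySem.Int.mod n 10 = PySem.Int.mod (PySem.Int.floordiv n 10) 10 + 1 ∧ n > 10 then
    stripRun (PySem.Int.floordiv n 10)
  else n
termination_by n.toNat
decreasing_by
  have h10 : PySem.Int.floordiv n 10 = n / 10 :=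
    PySem.Int.floordiv_eq_ediv_of_pos (by omega)
  rw [h10]; omega

-- outer loop `while i <= k: <strip>; final = n%10; i = i+1; n = n//10`,
-- `final : Option Int` threaded exactly as Python's (None before the first iteration)
def loopA : Nat → Int → Option Int → Option Int
  | 0, _, final => final
  | m + 1, n, _ =>
      let n' := stripRun n
      loopA m (PySem.Int.floordiv n' 10) (some (PySem.Int.mod n' 10))

def get_k_run_starter (n : Int) (k : Int) : Int :=
  -- A returns `final`, which is None (not an Int) exactly when k < 0: excluded by Pre_
  (loopA (k + 1).toNat n none).getD 0

-- ===== PORT B =====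
-- int(c) for a decimal digit character; exact on '0'..'9' (all that occurs under Pre_)
def digitVal (c : Char) : Int := (c.toNat : Int) - 48

-- the comprehension's filter: keep d when prev is None or d != prev + 1
def starterStep (p : Option Int) (d : Int) : Option Int :=
  match p with
  | none => some d
  | some q => if d ≠ q + 1 then some d else none

def get_k_run_starter_alt (n : Int) (k : Int) : Int :=
  let digits := (PySem.Int.toStr n).toList.map digitVal
  let starters := (((none : Option Int) :: digits.map some).zip digits).filterMap
      (fun pd => starterStep pd.1 pd.2)
  let runs := starters.reverse
  -- `runs[k]` with 0 ≤ k < len runs under Pre_ (getD 0 is unreachable there)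
  if k < (runs.length : Int) then (PySem.List.pyGet? runs k).getD 0 else 0

-- ===== PRECONDITION & SPEC =====
-- Pre_ excludes k < 0, where A returns None (not an Int), and restricts to the task's
-- natural domain n ≥ 0: on negative n, A's floor-division arithmetic returns digits of a
-- 9-padded expansion while B's str(n) parse raises ValueError on the '-' character.
def Pre_get_k_run_starter (n : Int) (k : Int) : Prop := 0 ≤ n ∧ 0 ≤ k
instance (n : Int) (k : Int) : Decidable (Pre_get_k_run_starter n k) := by
  unfold Pre_get_k_run_starter; infer_instance

def pvWitness_get_k_run_starter : Int × Int := (123444345, 0)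

def Spec_get_k_run_starter (n : Int) (k : Int) (out : Int) : Prop := out = get_k_run_starter_alt n k
instance (n : Int) (k : Int) (out : Int) : Decidable (Spec_get_k_run_starter n k out) := by
  unfold Spec_get_k_run_starter; infer_instance

-- ===== CLAIM (what is proved, stated in full; the proofs are below) =====
def Claim_equal_get_k_run_starter : Prop := ∀ (n : Int) (k : Int), Dom_get_k_run_starter n k → Pre_get_k_run_starter n k → Spec_get_k_run_starter n k (get_k_run_starter n k)

-- ===== LEMMAS AND PROOFS =====

-- run starters of the little-endian digit list (rightmost run's starter first):
-- a digit is a starter iff it is the most significant one or not (next digit) + 1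
def rsL : List Nat → List Nat
  | [] => []
  | [d] => [d]
  | d :: e :: rest => if d = e + 1 then rsL (e :: rest) else d :: rsL (e :: rest)

-- the common value both programs compute: the k-th starter counted from the right, 0 past the end
def valA (m k : Nat) : Nat := (rsL (Nat.digits 10 m)).getD k 0

lemma modc (m : Nat) : PySem.Int.mod (m : Int) 10 = ((m % 10 : Nat) : Int) := by
  exact_mod_cast PySem.Int.mod_natCast m 10

lemma divc (m : Nat) : PySem.Int.floordiv (m : Int) 10 = ((m / 10 : Nat) : Int) := by
  exact_mod_cast PySem.Int.floordiv_natCast m 10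

lemma cond_iff (m : Nat) :
    (PySem.Int.mod (m : Int) 10 = PySem.Int.mod (PySem.Int.floordiv (m : Int) 10) 10 + 1 ∧ (m : Int) > 10)
    ↔ (m % 10 = m / 10 % 10 + 1 ∧ 10 < m) := by
  rw [modc, divc, modc]
  constructor
  · rintro ⟨h1, h2⟩; exact ⟨by exact_mod_cast h1, by exact_mod_cast h2⟩
  · rintro ⟨h1, h2⟩; exact ⟨by exact_mod_cast h1, by exact_mod_cast h2⟩

lemma stripRun_step {n : Int}
    (h : PySem.Int.mod n 10 = PySem.Int.mod (PySem.Int.floordiv n 10) 10 + 1 ∧ n > 10) :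
    stripRun n = stripRun (PySem.Int.floordiv n 10) := by
  rw [stripRun, dif_pos h]

lemma stripRun_id {n : Int}
    (h : ¬(PySem.Int.mod n 10 = PySem.Int.mod (PySem.Int.floordiv n 10) 10 + 1 ∧ n > 10)) :
    stripRun n = n := by
  rw [stripRun, dif_neg h]

lemma stripRun_zero : stripRun 0 = 0 := stripRun_id (by decide)

lemma loopA_succ (m : Nat) (n : Int) (v : Option Int) :
    loopA (m + 1) n v
      = loopA m (PySem.Int.floordiv (stripRun n) 10) (some (PySem.Int.mod (stripRun n) 10)) := rfl

lemma loopA_zeroN : ∀ m : Nat, loopA m 0 (some 0) = some 0 := by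
  intro m
  induction m with
  | zero => rfl
  | succ m ih =>
      rw [loopA_succ, stripRun_zero]
      have h1 : PySem.Int.floordiv 0 10 = 0 := by decide
      have h2 : PySem.Int.mod 0 10 = 0 := by decide
      rw [h1, h2, ih]

lemma rsL_digits_strip (m : Nat) (h10 : 10 < m) (heq : m % 10 = m / 10 % 10 + 1) :
    rsL (Nat.digits 10 m) = rsL (Nat.digits 10 (m / 10)) := by
  rw [Nat.digits_def' (by norm_num : (1:Nat) < 10) (by omega : 0 < m),
      Nat.digits_def' (by norm_num : (1:Nat) < 10) (by omega : 0 < m / 10)]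
  rw [rsL, if_pos heq]

lemma no_strip_ne (m : Nat) (h10 : 10 ≤ m)
    (hC : ¬(m % 10 = m / 10 % 10 + 1 ∧ 10 < m)) : m % 10 ≠ m / 10 % 10 + 1 := by
  by_cases h11 : 10 < m
  · exact fun hp => hC ⟨hp, h11⟩
  · have hm : m = 10 := by omega
    subst hm; omega

lemma rsL_digits_cons (m : Nat) (h10 : 10 ≤ m) (hne : m % 10 ≠ m / 10 % 10 + 1) :
    rsL (Nat.digits 10 m) = m % 10 :: rsL (Nat.digits 10 (m / 10)) := by
  rw [Nat.digits_def' (by norm_num : (1:Nat) < 10) (by omega : 0 < m),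
      Nat.digits_def' (by norm_num : (1:Nat) < 10) (by omega : 0 < m / 10)]
  rw [rsL, if_neg hne]

lemma digits_single (m : Nat) (h0 : 0 < m) (hlt : m < 10) : Nat.digits 10 m = [m] := by
  rw [Nat.digits_def' (by norm_num : (1:Nat) < 10) h0]
  have : m / 10 = 0 := by omega
  rw [this, Nat.mod_eq_of_lt hlt]
  simp

-- A's loop computes valA
lemma A_main : ∀ (m k : Nat), loopA (k + 1) (m : Int) none = some ((valA m k : Nat) : Int) := by
  intro m
  induction m using Nat.strong_induction_on with
  | _ m IH =>
    intro k
    by_cases h0 : m = 0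
    · subst h0
      rw [show ((0 : Nat) : Int) = 0 by norm_num, loopA_succ, stripRun_zero]
      have h1 : PySem.Int.floordiv 0 10 = 0 := by decide
      have h2 : PySem.Int.mod 0 10 = 0 := by decide
      rw [h1, h2, loopA_zeroN]
      simp [valA, rsL]
    · by_cases hC : m % 10 = m / 10 % 10 + 1 ∧ 10 < m
      · have hs : stripRun (m : Int) = stripRun ((m / 10 : Nat) : Int) := by
          rw [stripRun_step ((cond_iff m).mpr hC), divc]
        have hstep : loopA (k + 1) (m : Int) none = loopA (k + 1) ((m / 10 : Nat) : Int) none := by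
          rw [loopA_succ, loopA_succ, hs]
        rw [hstep, IH (m / 10) (by omega) k]
        unfold valA
        rw [rsL_digits_strip m hC.2 hC.1]
      · have hs : stripRun (m : Int) = (m : Int) :=
          stripRun_id (fun h => hC ((cond_iff m).mp h))
        rw [loopA_succ, hs, divc, modc]
        cases k with
        | zero =>
            show some ((m % 10 : Nat) : Int) = some ((valA m 0 : Nat) : Int)
            congr 1
            by_cases hlt : m < 10
            · unfold valA
              rw [digits_single m (by omega) hlt]
              simp [rsL, Nat.mod_eq_of_lt hlt]
            · unfold valA
              rw [rsL_digits_cons m (by omega) (no_strip_ne m (by omega) hC)]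
              simp
        | succ j =>
            have how : loopA (j + 1) ((m / 10 : Nat) : Int) (some ((m % 10 : Nat) : Int))
                = loopA (j + 1) ((m / 10 : Nat) : Int) none := rfl
            rw [how, IH (m / 10) (by omega) j]
            congr 2
            by_cases hlt : m < 10
            · unfold valA
              rw [digits_single m (by omega) hlt]
              have : m / 10 = 0 := by omega
              rw [this]
              simp [rsL]
            · unfold valA
              rw [rsL_digits_cons m (by omega) (no_strip_ne m (by omega) hC)]
              simp

-- ---- B side ----

lemma toDigitsCore_digits : ∀ (f n : Nat) (acc : List Char), n < f → 1 ≤ n →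
    Nat.toDigitsCore 10 f n acc = (Nat.digits 10 n).reverse.map Nat.digitChar ++ acc := by
  intro f
  induction f with
  | zero => intro n acc hf hn; omega
  | succ f ih =>
    intro n acc hf hn
    simp only [Nat.toDigitsCore]
    by_cases h : n / 10 = 0
    · have hlt : n < 10 := by omega
      rw [if_pos h, digits_single n (by omega) hlt, Nat.mod_eq_of_lt hlt]
      simp
    · rw [if_neg h, ih (n / 10) _ (by omega) (by omega)]
      rw [Nat.digits_def' (by norm_num : (1:Nat) < 10) (by omega : 0 < n)]
      simp

lemma toDigits_eq (n : Nat) (hn : 1 ≤ n) :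
    Nat.toDigits 10 n = (Nat.digits 10 n).reverse.map Nat.digitChar := by
  show Nat.toDigitsCore 10 (n + 1) n [] = _
  rw [toDigitsCore_digits (n + 1) n [] (by omega) hn]
  simp

lemma toChars_nat (m : Nat) : PySem.Int.toChars (m : Int) = Nat.toDigits 10 m := by
  simp [PySem.Int.toChars]

lemma digitVal_digitChar (d : Nat) (h : d < 10) : digitVal (Nat.digitChar d) = Int.ofNat d := by
  interval_cases d <;> decide

-- the zip-with-previous comprehension as a structural recursion with the previous digit as state
def rsB : List Int → Option Int → List Int
  | [], _ => []
  | d :: rest, prev =>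
      match starterStep prev d with
      | some v => v :: rsB rest (some d)
      | none => rsB rest (some d)

lemma zip_filter_eq_rsB : ∀ (ds : List Int) (prev : Option Int),
    ((prev :: ds.map some).zip ds).filterMap (fun pd => starterStep pd.1 pd.2)
      = rsB ds prev := by
  intro ds
  induction ds with
  | nil => intro prev; rfl
  | cons d rest ih =>
      intro prev
      show ((prev, d) :: ((some d :: rest.map some).zip rest)).filterMap
          (fun pd => starterStep pd.1 pd.2) = rsB (d :: rest) prev
      rw [List.filterMap_cons]
      cases h : starterStep prev d with
      | none => simp only [h, rsB, ih]
      | some v => simp only [h, rsB, ih]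

lemma rsB_append : ∀ (ys : List Int) (hys : ys ≠ []) (c : Int) (prev : Option Int),
    rsB (ys ++ [c]) prev =
      rsB ys prev ++ (if c = (ys.getLast hys) + 1 then [] else [c]) := by
  intro ys
  induction ys with
  | nil => intro h; exact absurd rfl h
  | cons y t ih =>
    intro _ c prev
    cases t with
    | nil =>
        by_cases h : c = y + 1
        · cases prev with
          | none => simp [rsB, starterStep, h]
          | some p => by_cases hy : y ≠ p + 1 <;> simp [rsB, starterStep, h, hy]
        · cases prev with
          | none => simp [rsB, starterStep, h]
          | some p => by_cases hy : y ≠ p + 1 <;> simp [rsB, starterStep, h, hy]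
    | cons y' t' =>
        have hgl : (y :: y' :: t').getLast (by simp) = (y' :: t').getLast (by simp) :=
          List.getLast_cons (by simp)
        have key := ih (by simp) c (some y)
        cases prev with
        | none =>
            show y :: rsB ((y' :: t') ++ [c]) (some y)
                = (y :: rsB (y' :: t') (some y)) ++ _
            rw [key, hgl, List.cons_append]
        | some p =>
            by_cases hy : y ≠ p + 1
            · show (match starterStep (some p) y with
                    | some v => v :: rsB ((y' :: t') ++ [c]) (some y)
                    | none => rsB ((y' :: t') ++ [c]) (some y))
                  = (match starterStep (some p) y with
                    | some v => v :: rsB (y' :: t') (some y)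
                    | none => rsB (y' :: t') (some y)) ++ _
              simp only [starterStep, if_pos hy]
              rw [key, hgl, List.cons_append]
            · show (match starterStep (some p) y with
                    | some v => v :: rsB ((y' :: t') ++ [c]) (some y)
                    | none => rsB ((y' :: t') ++ [c]) (some y))
                  = (match starterStep (some p) y with
                    | some v => v :: rsB (y' :: t') (some y)
                    | none => rsB (y' :: t') (some y)) ++ _
              simp only [starterStep, if_neg hy]
              rw [key, hgl]

lemma rsB_rev : ∀ (L : List Nat), L ≠ [] →
    (rsB ((L.reverse).map Int.ofNat) none).reverse
      = (rsL L).map Int.ofNat := by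
  intro L
  induction L with
  | nil => intro h; exact absurd rfl h
  | cons d t ih =>
    intro _
    cases t with
    | nil => simp [rsL, rsB, starterStep]
    | cons e t' =>
        have hrev : ((d :: e :: t').reverse).map Int.ofNat
            = ((t'.reverse).map Int.ofNat ++ [(e : Int)]) ++ [(d : Int)] := by
          simp
        have hys : (t'.reverse).map Int.ofNat ++ [(e : Int)] ≠ [] := by simp
        rw [hrev, rsB_append _ hys (d : Int) none]
        have hglast : ((t'.reverse).map Int.ofNat ++ [(e : Int)]).getLast hys
            = (e : Int) := by simp
        rw [hglast]
        have hrec : (rsB ((t'.reverse).map Int.ofNat ++ [(e : Int)]) none).reverse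
            = (rsL (e :: t')).map Int.ofNat := by
          have := ih (by simp)
          simpa using this
        by_cases hde : d = e + 1
        · have : ((d : Int)) = (e : Int) + 1 := by exact_mod_cast hde
          rw [if_pos this]
          simp only [List.append_nil]
          rw [hrec, rsL, if_pos hde]
        · have : ¬((d : Int)) = (e : Int) + 1 := by exact_mod_cast hde
          rw [if_neg this]
          rw [List.reverse_append, hrec, rsL, if_neg hde]
          simp

lemma B_main (m j : Nat) :
    get_k_run_starter_alt (m : Int) (j : Int) = ((valA m j : Nat) : Int) := by
  have hchars : ∀ (L : List Nat), Nat.digits 10 m = L → m ≠ 0 →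
      (PySem.Int.toStr ((m : Nat) : Int)).toList.map digitVal
        = (L.reverse).map Int.ofNat := by
    intro L hL hm
    rw [PySem.Int.toList_toStr, toChars_nat, toDigits_eq m (by omega), hL]
    rw [List.map_map]
    refine List.map_congr_left ?_
    intro x hx
    have hx10 : x < 10 := Nat.digits_lt_base (by norm_num)
      (by rw [hL]; exact (List.mem_reverse).1 hx)
    exact digitVal_digitChar x hx10
  by_cases hm : m = 0
  · subst hm
    have hd : (PySem.Int.toStr ((0 : Nat) : Int)).toList.map digitVal = [0] := by
      rw [PySem.Int.toList_toStr]; decide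
    simp only [get_k_run_starter_alt, hd]
    have hst : rsB [0] none = [0] := by decide
    rw [zip_filter_eq_rsB, hst]
    have hval : valA 0 j = 0 := by simp [valA, rsL]
    rw [hval]
    by_cases hj : j = 0
    · subst hj; norm_num
    · have : ¬(((j : Int)) < (([(0:Int)].reverse.length : Nat) : Int)) := by
        simp; omega
      rw [if_neg this]
      norm_num
  · have hdg := hchars (Nat.digits 10 m) rfl hm
    simp only [get_k_run_starter_alt, hdg, zip_filter_eq_rsB]
    set L := Nat.digits 10 m with hLdef
    have hstrev : (rsB ((L.reverse).map Int.ofNat) none).reverse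
        = (rsL L).map Int.ofNat := rsB_rev L (Nat.digits_ne_nil_iff_ne_zero.mpr hm)
    rw [hstrev]
    by_cases hj : j < (rsL L).length
    · have hlt : ((j : Int)) < ((((rsL L).map Int.ofNat).length : Nat) : Int) := by
        simp; omega
      rw [if_pos hlt, PySem.List.pyGet?_natCast]
      have hjr : j < ((rsL L).map Int.ofNat).length := by simpa using hj
      rw [List.getElem?_eq_getElem hjr, List.getElem_map]
      unfold valA
      rw [← hLdef, List.getD_eq_getElem?_getD, List.getElem?_eq_getElem hj]
      simp [Int.ofNat_eq_natCast]
    · have hge : ¬(((j : Int)) < ((((rsL L).map Int.ofNat).length : Nat) : Int)) := by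
        simp; omega
      rw [if_neg hge]
      have hvd : valA m j = 0 := by
        unfold valA
        exact List.getD_eq_default _ _ (by rw [← hLdef]; omega)
      rw [hvd]; norm_num

-- ===== VERDICT (by name: the statement is the Claim_ definition above) =====
theorem get_k_run_starter_spec : Claim_equal_get_k_run_starter := by
  intro n k _ hpre
  obtain ⟨hn, hk⟩ := hpre
  unfold Spec_get_k_run_starter
  obtain ⟨m, rfl⟩ : ∃ m : Nat, n = (m : Int) := ⟨n.toNat, (Int.toNat_of_nonneg hn).symm⟩
  obtain ⟨j, rfl⟩ : ∃ j : Nat, k = (j : Int) := ⟨k.toNat, (Int.toNat_of_nonneg hk).symm⟩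
  unfold get_k_run_starter
  have ht : ((j : Int) + 1).toNat = j + 1 := by omega
  rw [ht, A_main m j, B_main m j]
  rfl
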